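-- pv_equiv track=rewrite | github.com/FudanSELab/ZEROVAR | script/var_exp/pseudo_param/AbbExpansion_predict.py | add_exps_to_method
-- ===== SOURCE A (Python) =====
-- def add_exps_to_method(explanations, method, insert_line):
--     '''
--         把生成的解释插入到方法中
--     '''
--     explanation = "// " +" ".join(explanations)
--     lines = method.split("\n")
--     enriched_method = ""
--     for idx, line in enumerate(lines, 1):
--         if insert_line == idx:
--             enriched_method += "\n" + explanation +"\n"
--         enriched_method += line + "\n"
--     return enriched_method
-- ===== SOURCE B (Python) =====
-- def add_exps_to_method(explanations, method, insert_line):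
--     explanation = "// " + " ".join(explanations)
--     lines = method.split("\n")
--     if 1 <= insert_line <= len(lines):
--         lines.insert(insert_line - 1, explanation)
--         lines.insert(insert_line - 1, "")
--     lines.append("")
--     return "\n".join(lines)
-- ===== Notes on version B (the rewrite author's own statement) =====
-- stated objective: simpler
-- what changed: Replaced the per-line enumerate loop with its in-loop insert_line==idx branch and string accumulator by a direct list.insert of the explanation (and an empty line) at index insert_line-1 followed by a single "\n".join.
import Mathlib
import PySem

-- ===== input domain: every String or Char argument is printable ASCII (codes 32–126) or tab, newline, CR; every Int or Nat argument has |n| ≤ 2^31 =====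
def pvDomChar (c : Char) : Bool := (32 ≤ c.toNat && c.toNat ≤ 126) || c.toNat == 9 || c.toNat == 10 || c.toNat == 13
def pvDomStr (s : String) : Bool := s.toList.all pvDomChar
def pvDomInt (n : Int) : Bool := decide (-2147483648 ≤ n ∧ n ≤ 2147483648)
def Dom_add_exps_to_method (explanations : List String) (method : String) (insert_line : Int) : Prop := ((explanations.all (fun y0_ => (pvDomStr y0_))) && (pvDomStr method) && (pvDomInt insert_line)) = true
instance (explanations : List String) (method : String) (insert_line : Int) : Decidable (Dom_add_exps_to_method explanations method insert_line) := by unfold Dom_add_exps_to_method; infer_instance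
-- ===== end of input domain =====

-- B replaces A's per-line enumerate loop (with its in-loop insert_line==idx branch) by a
-- direct list.insert at the computed index followed by one "\n".join — simpler, same result.

-- ===== PORT A =====
def add_exps_to_method (explanations : List String) (method : String) (insert_line : Int) : String :=
  let explanation : List Char := "// ".toList ++ PySem.Chars.join " ".toList (explanations.map String.toList)
  let lines := PySem.Chars.splitOn method.toList "\n".toList
  String.ofList ((PySem.List.enumerate lines 1).foldl
    (fun acc p =>
      (if insert_line == p.1 then acc ++ '\n' :: (explanation ++ ['\n']) else acc) ++ p.2 ++ ['\n']) [])

-- ===== PORT B =====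
def add_exps_to_method_alt (explanations : List String) (method : String) (insert_line : Int) : String :=
  let explanation : List Char := "// ".toList ++ PySem.Chars.join " ".toList (explanations.map String.toList)
  let lines := PySem.Chars.splitOn method.toList "\n".toList
  let lines2 := if 1 ≤ insert_line ∧ insert_line ≤ PySem.List.len lines then
      PySem.List.insert (PySem.List.insert lines (insert_line - 1) explanation) (insert_line - 1) []
    else lines
  String.ofList (PySem.Chars.join "\n".toList (lines2 ++ [[]]))

-- ===== PRECONDITION & SPEC =====
def Spec_add_exps_to_method (explanations : List String) (method : String) (insert_line : Int) (out : String) : Prop := out = add_exps_to_method_alt explanations method insert_line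
instance (explanations : List String) (method : String) (insert_line : Int) (out : String) : Decidable (Spec_add_exps_to_method explanations method insert_line out) := by unfold Spec_add_exps_to_method; infer_instance

-- ===== CLAIM (what is proved, stated in full; the proofs are below) =====
def Claim_equal_add_exps_to_method : Prop := ∀ (explanations : List String) (method : String) (insert_line : Int), Dom_add_exps_to_method explanations method insert_line → Spec_add_exps_to_method explanations method insert_line (add_exps_to_method explanations method insert_line)

-- ===== LEMMAS AND PROOFS =====

-- A's loop output on lines numbered from s: the inserted block lands before line number i.
def pvRender (i : Int) (expl : List Char) : List (List Char) → Int → List Char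
  | [], _ => []
  | l :: ls, s => (if i = s then '\n' :: (expl ++ ['\n']) else []) ++ l ++ '\n' :: pvRender i expl ls (s + 1)

-- "\n".join(ls + [""]) written as a flatten: every line followed by one '\n'.
def pvPlain (ls : List (List Char)) : List Char := (ls.map (· ++ ['\n'])).flatten

theorem pvFoldA (i : Int) (expl : List Char) :
    ∀ (ls : List (List Char)) (s : Int) (acc : List Char),
      (PySem.List.enumerate ls s).foldl
        (fun acc p => (if i == p.1 then acc ++ '\n' :: (expl ++ ['\n']) else acc) ++ p.2 ++ ['\n']) acc
      = acc ++ pvRender i expl ls s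
  | [], s, acc => by simp [PySem.List.enumerate, pvRender]
  | l :: ls, s, acc => by
    rw [PySem.List.enumerate_cons, List.foldl_cons, pvFoldA i expl ls (s + 1)]
    by_cases h : i = s <;> simp [pvRender, h]

theorem pvJoinNL : ∀ (ls : List (List Char)),
    PySem.Chars.join ['\n'] (ls ++ [[]]) = pvPlain ls
  | [] => by simp [PySem.Chars.join, pvPlain, List.intercalate]
  | l :: ls => by
    rcases h : ls ++ [([] : List Char)] with _ | ⟨q, rest⟩
    · simp at h
    · rw [List.cons_append, h, PySem.Chars.join_cons_cons, ← h, pvJoinNL ls]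
      simp [pvPlain]

theorem pvPlain_append (xs ys : List (List Char)) :
    pvPlain (xs ++ ys) = pvPlain xs ++ pvPlain ys := by
  simp [pvPlain]

theorem pvRender_out (i : Int) (expl : List Char) :
    ∀ (ls : List (List Char)) (s : Int), (i < s ∨ s + ls.length ≤ i) →
      pvRender i expl ls s = pvPlain ls
  | [], s, _ => by simp [pvRender, pvPlain]
  | l :: ls, s, h => by
    have hne : i ≠ s := by simp at h; omega
    rw [pvRender, if_neg hne, pvRender_out i expl ls (s + 1) (by simp at h ⊢; omega)]
    simp [pvPlain]

theorem pvRender_in (i : Int) (expl : List Char) :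
    ∀ (ls : List (List Char)) (s : Int), s ≤ i → i < s + ls.length →
      pvRender i expl ls s
        = pvPlain (ls.take (i - s).toNat) ++ '\n' :: (expl ++ '\n' :: pvPlain (ls.drop (i - s).toNat))
  | [], s, h1, h2 => by simp at h2; omega
  | l :: ls, s, h1, h2 => by
    by_cases h : i = s
    · rw [pvRender, if_pos h, pvRender_out i expl ls (s + 1) (by omega)]
      have : (i - s).toNat = 0 := by omega
      simp [this, pvPlain]
    · have hs : s + 1 ≤ i := by omega
      rw [pvRender, if_neg h,
        pvRender_in i expl ls (s + 1) hs (by simp at h2 ⊢; omega)]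
      have ht : (i - s).toNat = (i - (s + 1)).toNat + 1 := by omega
      simp [ht, pvPlain]

-- ===== VERDICT (by name: the statement is the Claim_ definition above) =====
theorem add_exps_to_method_spec : Claim_equal_add_exps_to_method := by
  intro explanations method insert_line _
  unfold Spec_add_exps_to_method
  simp only [add_exps_to_method, add_exps_to_method_alt]
  set expl : List Char := "// ".toList ++ PySem.Chars.join " ".toList (explanations.map String.toList) with hexpl
  set lines := PySem.Chars.splitOn method.toList "\n".toList with hlines
  have hnl : "\n".toList = ['\n'] := rfl
  rw [pvFoldA, List.nil_append]
  by_cases h : 1 ≤ insert_line ∧ insert_line ≤ PySem.List.len lines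
  · rw [if_pos h]
    rw [PySem.List.len_eq] at h
    set p : Nat := (insert_line - 1).toNat with hp
    have hple : p ≤ lines.length := by omega
    have hcast : insert_line - 1 = ((p : Nat) : Int) := by omega
    rw [hcast, PySem.List.insert_natCast lines p expl hple,
      PySem.List.insert_natCast _ p ([] : List Char) (by simp; omega)]
    have htake : (lines.take p ++ expl :: lines.drop p).take p = lines.take p := by
      rw [List.take_append_of_le_length (by simp; omega)]; simp
    have hdrop : (lines.take p ++ expl :: lines.drop p).drop p = expl :: lines.drop p := by
      rw [List.drop_append_of_le_length (by simp; omega)]; simp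
    rw [htake, hdrop, hnl, pvJoinNL,
      pvRender_in insert_line expl lines 1 h.1 (by omega)]
    have h1 : (insert_line - 1).toNat = p := rfl
    rw [h1, pvPlain_append]
    simp [pvPlain]
  · rw [if_neg h, hnl, pvJoinNL,
      pvRender_out insert_line expl lines 1 (by rw [PySem.List.len_eq] at h; omega)]
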